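-- pv_equiv track=rewrite | github.com/AutoLyap/AutoLyap | docs/source/examples/scripts/shared/plotting_utils.py | _latex_to_svg_label
-- ===== SOURCE A (Python) =====
-- _LATEX_SYMBOLS = {
--     r"\alpha": "α",
--     r"\beta": "β",
--     r"\gamma": "γ",
--     r"\delta": "δ",
--     r"\epsilon": "ε",
--     r"\eta": "η",
--     r"\kappa": "κ",
--     r"\lambda": "λ",
--     r"\mu": "μ",
--     r"\nu": "ν",
--     r"\rho": "ρ",
--     r"\sigma": "σ",
--     r"\tau": "τ",
--     r"\phi": "φ",
--     r"\psi": "ψ",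
--     r"\omega": "ω",
--     r"\Gamma": "Γ",
--     r"\Delta": "Δ",
--     r"\Lambda": "Λ",
--     r"\Sigma": "Σ",
--     r"\Phi": "Φ",
--     r"\Psi": "Ψ",
--     r"\Omega": "Ω",
-- }
--
-- def _latex_to_svg_label(text: str) -> tuple[str, bool]:
--     """Map lightweight LaTeX-style labels to SVG-friendly text.
--
--     Supports simple `$...$` wrappers and common Greek macros.
--     """
--     stripped = text.strip()
--     is_math = False
--     if "$" in stripped:
--         is_math = True
--     if stripped.startswith("$") and stripped.endswith("$") and len(stripped) >= 2:
--         stripped = stripped[1:-1].strip()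
--         is_math = True
--     if "\\" in stripped:
--         is_math = True
--
--     converted = stripped
--     for latex_macro, unicode_symbol in _LATEX_SYMBOLS.items():
--         if latex_macro in converted:
--             converted = converted.replace(latex_macro, unicode_symbol)
--
--     converted = (
--         converted.replace("{", "")
--         .replace("}", "")
--         .replace("$", "")
--         .replace(r"\,", " ")
--         .replace(r"\ ", " ")
--         .strip()
--     )
--     return converted, is_math
-- ===== SOURCE B (Python) =====
-- _GREEK = {
--     "alpha": "α",
--     "beta": "β",
--     "gamma": "γ",
--     "delta": "δ",
--     "epsilon": "ε",
--     "eta": "η",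
--     "kappa": "κ",
--     "lambda": "λ",
--     "mu": "μ",
--     "nu": "ν",
--     "rho": "ρ",
--     "sigma": "σ",
--     "tau": "τ",
--     "phi": "φ",
--     "psi": "ψ",
--     "omega": "ω",
--     "Gamma": "Γ",
--     "Delta": "Δ",
--     "Lambda": "Λ",
--     "Sigma": "Σ",
--     "Phi": "Φ",
--     "Psi": "Ψ",
--     "Omega": "Ω",
-- }
--
--
-- def _collapse(ch, cs):
--     """Replace each backslash-<ch> pair by a single space, left to right."""
--     res = []
--     i = 0
--     while i < len(cs):
--         if cs[i] == "\\" and i + 1 < len(cs) and cs[i + 1] == ch: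
--             res.append(" ")
--             i += 2
--         else:
--             res.append(cs[i])
--             i += 1
--     return res
--
--
-- def _latex_to_svg_label(text: str) -> tuple[str, bool]:
--     """Map lightweight LaTeX-style labels to SVG-friendly text.
--
--     Backslash-triggered single scan with a name-keyed table instead of one
--     whole-string replace pass per macro; the math flag is one expression.
--     """
--     s = text.strip()
--     wrapped = len(s) >= 2 and s[0] == "$" and s[-1] == "$"
--     inner = s[1:-1].strip() if wrapped else s
--     is_math = "$" in s or wrapped or "\\" in inner
--
--     raw = []
--     i = 0
--     while i < len(inner):
--         if inner[i] == "\\":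
--             for name, sym in _GREEK.items():
--                 if inner.startswith(name, i + 1):
--                     raw.append(sym)
--                     i += 1 + len(name)
--                     break
--             else:
--                 raw.append("\\")
--                 i += 1
--         else:
--             raw.append(inner[i])
--             i += 1
--
--     cleaned = [c for c in raw if c not in "{}$"]
--     converted = "".join(_collapse(" ", _collapse(",", cleaned))).strip()
--     return converted, is_math
-- ===== Notes on version B (the rewrite author's own statement) =====
-- stated objective: alternative
-- what changed: A runs one whole-string replace pass per Greek macro (23 passes each preceded by a containment scan), then chained replaces deleting braces/dollars and collapsing backslash-comma/backslash-space, threading the math flag through mutating branches; B computes the unwrap and the math flag as single expressions, substitutes all macros in one backslash-triggered left-to-right scan over a name-keyed table, filters brace/dollar characters with one comprehension, and collapses the two backslash pairs with a small explicit pair-scan helper.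
import Mathlib
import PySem

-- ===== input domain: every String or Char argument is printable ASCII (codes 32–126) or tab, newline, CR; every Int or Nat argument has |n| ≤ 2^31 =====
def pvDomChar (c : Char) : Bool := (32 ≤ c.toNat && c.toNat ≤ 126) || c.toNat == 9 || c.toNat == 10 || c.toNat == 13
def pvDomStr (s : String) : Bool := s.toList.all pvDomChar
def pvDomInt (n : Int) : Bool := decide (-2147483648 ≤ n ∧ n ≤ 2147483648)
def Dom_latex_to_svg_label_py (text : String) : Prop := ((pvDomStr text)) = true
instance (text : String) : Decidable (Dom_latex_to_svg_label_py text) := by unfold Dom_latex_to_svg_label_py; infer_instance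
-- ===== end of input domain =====

-- B replaces A's 23 whole-string `.replace` passes and mutating flag/unwrap branches by one
-- backslash-triggered scan over a name-keyed table, a filter, two pair-collapse scans, and
-- single-expression unwrap/flag computations (objective: alternative; same results).

-- ===== PORT A =====
-- the module constant _LATEX_SYMBOLS (insertion order)
def pvLatexSymbols : List (List Char × List Char) := [
  (['\\', 'a', 'l', 'p', 'h', 'a'], ['α']),
  (['\\', 'b', 'e', 't', 'a'], ['β']),
  (['\\', 'g', 'a', 'm', 'm', 'a'], ['γ']),
  (['\\', 'd', 'e', 'l', 't', 'a'], ['δ']),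
  (['\\', 'e', 'p', 's', 'i', 'l', 'o', 'n'], ['ε']),
  (['\\', 'e', 't', 'a'], ['η']),
  (['\\', 'k', 'a', 'p', 'p', 'a'], ['κ']),
  (['\\', 'l', 'a', 'm', 'b', 'd', 'a'], ['λ']),
  (['\\', 'm', 'u'], ['μ']),
  (['\\', 'n', 'u'], ['ν']),
  (['\\', 'r', 'h', 'o'], ['ρ']),
  (['\\', 's', 'i', 'g', 'm', 'a'], ['σ']),
  (['\\', 't', 'a', 'u'], ['τ']),
  (['\\', 'p', 'h', 'i'], ['φ']),
  (['\\', 'p', 's', 'i'], ['ψ']),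
  (['\\', 'o', 'm', 'e', 'g', 'a'], ['ω']),
  (['\\', 'G', 'a', 'm', 'm', 'a'], ['Γ']),
  (['\\', 'D', 'e', 'l', 't', 'a'], ['Δ']),
  (['\\', 'L', 'a', 'm', 'b', 'd', 'a'], ['Λ']),
  (['\\', 'S', 'i', 'g', 'm', 'a'], ['Σ']),
  (['\\', 'P', 'h', 'i'], ['Φ']),
  (['\\', 'P', 's', 'i'], ['Ψ']),
  (['\\', 'O', 'm', 'e', 'g', 'a'], ['Ω'])]

def latex_to_svg_label_py (text : String) : String × Bool :=
  let stripped := PySem.Chars.strip text.toList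
  let is_math : Bool := false
  let is_math := if PySem.Chars.isIn ['$'] stripped then true else is_math
  let sm :=
    if PySem.Chars.startswith stripped ['$'] && PySem.Chars.endswith stripped ['$']
        && decide (2 ≤ stripped.length)
    then (PySem.Chars.strip (PySem.Chars.slice stripped (some 1) (some (-1))), true)
    else (stripped, is_math)
  let stripped := sm.1
  let is_math := sm.2
  let is_math := if PySem.Chars.isIn ['\\'] stripped then true else is_math
  let converted := pvLatexSymbols.foldl
    (fun s p => if PySem.Chars.isIn p.1 s then PySem.Chars.replace s p.1 p.2 else s) stripped
  let converted := PySem.Chars.strip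
    (PySem.Chars.replace
      (PySem.Chars.replace
        (PySem.Chars.replace (PySem.Chars.replace (PySem.Chars.replace converted ['{'] []) ['}'] [])
          ['$'] [])
        ['\\', ','] [' '])
      ['\\', ' '] [' '])
  (String.ofList converted, is_math)

-- ===== PORT B =====
-- B's module constant _GREEK: macro names without the backslash, mapped to one symbol each
def pvGreek : List (String × Char) := [
  ("alpha", 'α'), ("beta", 'β'), ("gamma", 'γ'), ("delta", 'δ'), ("epsilon", 'ε'),
  ("eta", 'η'), ("kappa", 'κ'), ("lambda", 'λ'), ("mu", 'μ'), ("nu", 'ν'),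
  ("rho", 'ρ'), ("sigma", 'σ'), ("tau", 'τ'), ("phi", 'φ'), ("psi", 'ψ'),
  ("omega", 'ω'), ("Gamma", 'Γ'), ("Delta", 'Δ'), ("Lambda", 'Λ'), ("Sigma", 'Σ'),
  ("Phi", 'Φ'), ("Psi", 'Ψ'), ("Omega", 'Ω')]

-- B's helper _collapse: replace each backslash-<ch> pair by one space, left to right
def pvSlash (ch : Char) : List Char → List Char
  | [] => []
  | [c] => [c]
  | c :: d :: t =>
    if c = '\\' ∧ d = ch then ' ' :: pvSlash ch t
    else c :: pvSlash ch (d :: t)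
termination_by s => s.length

-- B's macro scan: only a backslash starts a macro; look the following name up in table order
def pvScanB : List Char → List Char
  | [] => []
  | c :: rest =>
    if c = '\\' then
      match pvGreek.find? (fun p => p.1.toList.isPrefixOf rest) with
      | some p => p.2 :: pvScanB (List.drop p.1.toList.length rest)
      | none => '\\' :: pvScanB rest
    else c :: pvScanB rest
termination_by s => s.length
decreasing_by
  · simp only [List.length_drop, List.length_cons]; omega
  · simp
  · simp

def latex_to_svg_label_py_alt (text : String) : String × Bool :=
  let s := PySem.Chars.strip text.toList
  let wrapped := decide (2 ≤ s.length) && (PySem.List.pyGet? s 0 == some '$')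
      && (PySem.List.pyGet? s (-1) == some '$')
  let inner := if wrapped then PySem.Chars.strip (PySem.Chars.slice s (some 1) (some (-1))) else s
  let is_math := PySem.Chars.isIn ['$'] s || wrapped || PySem.Chars.isIn ['\\'] inner
  let cleaned := (pvScanB inner).filter (fun c => decide (c ∉ (['{', '}', '$'] : List Char)))
  (String.ofList (PySem.Chars.strip (pvSlash ' ' (pvSlash ',' cleaned))), is_math)

-- ===== PRECONDITION & SPEC =====
def Spec_latex_to_svg_label_py (text : String) (out : String × Bool) : Prop := out = latex_to_svg_label_py_alt text
instance (text : String) (out : String × Bool) : Decidable (Spec_latex_to_svg_label_py text out) := by unfold Spec_latex_to_svg_label_py; infer_instance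

-- ===== CLAIM (what is proved, stated in full; the proofs are below) =====
def Claim_equal_latex_to_svg_label_py : Prop := ∀ (text : String), Dom_latex_to_svg_label_py text → Spec_latex_to_svg_label_py text (latex_to_svg_label_py text)

-- ===== LEMMAS AND PROOFS =====

-- A's sequential replace passes, re-characterised as one leftmost scan over the full table
def pvScan (T : List (List Char × List Char)) : List Char → List Char
  | [] => []
  | c :: rest =>
    match T.find? (fun p => PySem.Chars.startswith (c :: rest) p.1) with
    | some p => p.2 ++ pvScan T (List.drop (p.1.length - 1) rest)
    | none => c :: pvScan T rest
termination_by s => s.length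
decreasing_by
  · simp only [List.length_drop, List.length_cons]; omega
  · simp

-- clean structural form of Python's str.replace for a nonempty pattern
def pvRepl (old new : List Char) : List Char → List Char
  | [] => []
  | c :: t =>
    if old.isPrefixOf (c :: t) && !old.isEmpty
    then new ++ pvRepl old new (List.drop (old.length - 1) t)
    else c :: pvRepl old new t
termination_by s => s.length
decreasing_by
  · simp only [List.length_drop, List.length_cons]; omega
  · simp

lemma pv_go_eq (old new : List Char) (h : old ≠ []) :
    ∀ fuel (l acc : List Char), l.length ≤ fuel →
      PySem.Chars.replace.go old new fuel l acc = acc.reverse ++ pvRepl old new l := by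
  intro fuel
  induction fuel with
  | zero =>
    intro l acc hl
    have : l = [] := by cases l <;> simp_all
    subst this
    simp [PySem.Chars.replace.go, pvRepl]
  | succ n ih =>
    intro l acc hl
    cases l with
    | nil => simp [PySem.Chars.replace.go, pvRepl]
    | cons c t =>
      rw [PySem.Chars.replace.go]
      by_cases hpre : old.isPrefixOf (c :: t) = true
      · simp only [hpre, if_true]
        have hlen : 1 ≤ old.length := by cases old <;> simp_all
        have hd : List.drop old.length (c :: t) = List.drop (old.length - 1) t := by
          cases old with
          | nil => simp_all
          | cons o os => simp
        have hdl : (List.drop (old.length - 1) t).length ≤ n := by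
          simp only [List.length_drop]
          simp at hl
          omega
        rw [hd, ih _ _ hdl]
        rw [pvRepl]
        simp [hpre, List.isEmpty_eq_false_iff.mpr h]
      · simp only [hpre]
        have : t.length ≤ n := by simp at hl; omega
        rw [ih _ _ this, pvRepl]
        simp [hpre]

lemma pv_replace_eq_pvRepl (old new : List Char) (h : old ≠ []) (s : List Char) :
    PySem.Chars.replace s old new = pvRepl old new s := by
  rw [PySem.Chars.replace]
  simp [List.isEmpty_eq_false_iff.mpr h, pv_go_eq old new h s.length s [] le_rfl]

lemma pvRepl_of_not_infix (old new : List Char) : ∀ s, ¬ old <:+: s →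
    pvRepl old new s = s := by
  intro s
  induction s with
  | nil => intro _; rw [pvRepl]
  | cons c t ih =>
    intro hni
    rw [pvRepl]
    have hpre : old.isPrefixOf (c :: t) = false := by
      rw [Bool.eq_false_iff]
      intro hx
      exact hni (List.IsPrefix.isInfix (List.isPrefixOf_iff_prefix.mp hx))
    simp only [hpre, Bool.false_and, Bool.false_eq_true, if_false]
    rw [ih (fun hx => hni (hx.trans (List.suffix_cons c t).isInfix))]

lemma pvRepl_single_del (c : Char) : ∀ s, pvRepl [c] [] s = s.filter (fun d => d != c) := by
  intro s
  induction s with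
  | nil => rw [pvRepl]; simp
  | cons d t ih =>
    rw [pvRepl]
    by_cases hdc : c = d
    · subst hdc
      simp [List.isPrefixOf, ih]
    · have : [c].isPrefixOf (d :: t) = false := by
        simp [List.isPrefixOf, hdc]
      simp [this, ih, bne, Ne.symm hdc]

-- table well-formedness: macro = '\' + ASCII non-backslash tail, output one non-ASCII char
def pvEntryOK (pr : List Char × List Char) : Bool :=
  (match pr.1 with
   | '\\' :: rt => rt.all (fun c => c != '\\' && decide (c.toNat < 128))
   | _ => false)
  && (match pr.2 with
      | [g] => decide (127 < g.toNat)
      | _ => false)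

def pvTableOK (T : List (List Char × List Char)) : Prop :=
  (∀ pr ∈ T, pvEntryOK pr = true) ∧
  T.Pairwise (fun a b => ¬ a.1.isPrefixOf b.1 = true ∧ ¬ b.1.isPrefixOf a.1 = true)

lemma pv_entry_shape {pr : List Char × List Char} (hp : pvEntryOK pr = true) :
    ∃ rt g, pr.1 = '\\' :: rt ∧ (∀ c ∈ rt, c ≠ '\\' ∧ c.toNat < 128) ∧
      pr.2 = [g] ∧ 127 < g.toNat := by
  unfold pvEntryOK at hp
  obtain ⟨m, o⟩ := pr
  simp only [Bool.and_eq_true] at hp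
  obtain ⟨h1, h2⟩ := hp
  split at h1
  case h_2 => exact absurd h1 (by simp)
  case h_1 rt =>
    split at h2
    case h_2 => exact absurd h2 (by simp)
    case h_1 g =>
      refine ⟨rt, g, rfl, ?_, rfl, by simpa using h2⟩
      intro x hx
      have := List.all_eq_true.mp h1 x hx
      simp at this
      exact ⟨this.1, this.2⟩

lemma pv_find?_none_head (T : List (List Char × List Char))
    (hT : ∀ pr ∈ T, pvEntryOK pr = true) (c : Char) (hc : c ≠ '\\') (w : List Char) :
    T.find? (fun p => PySem.Chars.startswith (c :: w) p.1) = none := by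
  rw [List.find?_eq_none]
  intro p hp
  obtain ⟨rt, g, hm, _, _, _⟩ := pv_entry_shape (hT p hp)
  simp [PySem.Chars.startswith, hm, List.isPrefixOf]
  intro hx
  exact absurd hx.symm hc

lemma pv_scan_nil_table : ∀ s, pvScan [] s = s := by
  intro s
  induction s with
  | nil => rw [pvScan]
  | cons c t ih => rw [pvScan]; simp [ih]

lemma pvScan_cons_none (T : List (List Char × List Char)) (c : Char) (rest : List Char)
    (h : T.find? (fun p => PySem.Chars.startswith (c :: rest) p.1) = none) :
    pvScan T (c :: rest) = c :: pvScan T rest := by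
  rw [pvScan, h]

lemma pvScan_cons_some (T : List (List Char × List Char)) (c : Char) (rest : List Char) (q : List Char × List Char)
    (h : T.find? (fun p => PySem.Chars.startswith (c :: rest) p.1) = some q) :
    pvScan T (c :: rest) = q.2 ++ pvScan T (List.drop (q.1.length - 1) rest) := by
  rw [pvScan, h]

lemma pv_scan_inert_append (T : List (List Char × List Char))
    (hT : ∀ pr ∈ T, pvEntryOK pr = true) :
    ∀ u v, (∀ c ∈ u, c ≠ '\\') → pvScan T (u ++ v) = u ++ pvScan T v := by
  intro u
  induction u with
  | nil => simp
  | cons c u' ih =>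
    intro v hu
    have hc : c ≠ '\\' := hu c (by simp)
    rw [List.cons_append, pvScan, pv_find?_none_head T hT c hc _]
    simp only []
    rw [ih v (fun x hx => hu x (by simp [hx]))]
    simp

lemma pvRepl_skip (old new : List Char) :
    ∀ u v, (∀ i, i < u.length → ¬ old.isPrefixOf (List.drop i (u ++ v)) = true) →
      pvRepl old new (u ++ v) = u ++ pvRepl old new v := by
  intro u
  induction u with
  | nil => simp
  | cons c u' ih =>
    intro v hu
    rw [List.cons_append, pvRepl]
    have h0 : old.isPrefixOf (c :: (u' ++ v)) = false := by
      have := hu 0 (by simp)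
      simp only [List.drop_zero] at this
      exact Bool.eq_false_iff.mpr (fun hx => this (by simpa using hx))
    simp only [h0, Bool.false_and, Bool.false_eq_true, if_false]
    rw [ih v (fun i hi => by simpa using hu (i + 1) (by simpa using hi))]
    simp

lemma pv_ascii_prefix_repl {p : List Char × List Char} (hp : pvEntryOK p = true) :
    ∀ (s rt : List Char), (∀ c ∈ rt, c.toNat < 128) → rt.isPrefixOf (pvRepl p.1 p.2 s) = true →
      rt.isPrefixOf s = true := by
  obtain ⟨rtp, g, hm, hrt, ho, hg⟩ := pv_entry_shape hp
  intro s
  induction s with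
  | nil =>
    intro rt _ hpre
    rw [pvRepl] at hpre
    exact hpre
  | cons d t ih =>
    intro rt hascii hpre
    rw [pvRepl] at hpre
    by_cases hb : (p.1.isPrefixOf (d :: t) && !p.1.isEmpty) = true
    · rw [if_pos hb] at hpre
      rw [ho] at hpre
      cases rt with
      | nil => simp [List.isPrefixOf]
      | cons e rt' =>
        simp only [List.cons_append, List.isPrefixOf] at hpre
        have he : e = g := by
          have := (Bool.and_eq_true _ _).mp hpre |>.1
          simpa using this
        have := hascii e (by simp)
        rw [he] at this
        omega
    · rw [if_neg (by simpa using hb)] at hpre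
      cases rt with
      | nil => simp [List.isPrefixOf]
      | cons e rt' =>
        simp only [List.isPrefixOf, Bool.and_eq_true] at hpre ⊢
        exact ⟨hpre.1, ih rt' (fun x hx => hascii x (by simp [hx])) hpre.2⟩

lemma pv_find?_first (T : List (List Char × List Char)) (q : List Char × List Char)
    (hq : q ∈ T) (x : List Char) (hmatch : PySem.Chars.startswith x q.1 = true)
    (huniq : ∀ r ∈ T, PySem.Chars.startswith x r.1 = true → r = q) :
    T.find? (fun p => PySem.Chars.startswith x p.1) = some q := by
  induction T with
  | nil => simp at hq
  | cons h T' ih =>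
    by_cases hh : PySem.Chars.startswith x h.1 = true
    · have : h = q := huniq h (by simp) hh
      subst this
      simp [hh]
    · have hq' : q ∈ T' := by
        cases List.mem_cons.mp hq with
        | inl he => exact absurd (he ▸ hmatch) hh
        | inr h' => exact h'
      rw [List.find?_cons_of_neg (by simpa using hh)]
      exact ih hq' (fun r hr => huniq r (by simp [hr]))

lemma pv_scan_repl (p : List Char × List Char) (T : List (List Char × List Char))
    (hp : pvEntryOK p = true) (hT : pvTableOK T) :
    ∀ n s, s.length ≤ n → pvScan T (pvRepl p.1 p.2 s) = pvScan (p :: T) s := by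
  obtain ⟨hsh, hpw⟩ := hT
  obtain ⟨rtp, g, hmp, hrtp, hop, hg⟩ := pv_entry_shape hp
  have hpne : p.1 ≠ [] := by rw [hmp]; simp
  intro n
  induction n with
  | zero =>
    intro s hs
    have : s = [] := by cases s <;> simp_all
    subst this
    rw [pvRepl, pvScan, pvScan]
  | succ n ih =>
    intro s hs
    cases s with
    | nil => rw [pvRepl, pvScan, pvScan]
    | cons c t =>
      simp only [List.length_cons] at hs
      by_cases hP : p.1.isPrefixOf (c :: t) = true
      · rw [pvRepl, if_pos (by simp [hP, List.isEmpty_eq_false_iff.mpr hpne])]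
        have hgn : g ≠ '\\' := by
          intro he; rw [he] at hg; simp [Char.toNat] at hg
        rw [pv_scan_inert_append T hsh p.2 _
          (by rw [hop]; intro x hx; simp at hx; rw [hx]; exact hgn)]
        rw [ih _ (by simp only [List.length_drop]; omega)]
        rw [pvScan_cons_some (p :: T) c t p
          (List.find?_cons_of_pos (by simpa [PySem.Chars.startswith] using hP))]
      · cases hfend : T.find? (fun r => PySem.Chars.startswith (c :: t) r.1) with
        | some q =>
          have hqmem : q ∈ T := List.mem_of_find?_eq_some hfend
          have hqmatch : PySem.Chars.startswith (c :: t) q.1 = true := by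
            have := List.find?_some hfend
            simpa using this
          obtain ⟨rtq, gq, hmq, hrtq, hoq, hgq⟩ := pv_entry_shape (hsh q hqmem)
          have hqpre : q.1 <+: (c :: t) := List.isPrefixOf_iff_prefix.mp (by simpa [PySem.Chars.startswith] using hqmatch)
          set v := List.drop rtq.length t with hv
          have hsdec : c :: t = q.1 ++ v := by
            have h0 := List.prefix_iff_eq_append.mp hqpre
            have h1 : List.drop q.1.length (c :: t) = v := by rw [hmq, hv]; simp
            rw [h1] at h0
            exact h0.symm
          have hskip : pvRepl p.1 p.2 (c :: t) = q.1 ++ pvRepl p.1 p.2 v := by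
            rw [hsdec, pvRepl_skip]
            intro i hi
            match i with
            | 0 =>
              rw [List.drop_zero, ← hsdec]
              simp [hP]
            | Nat.succ j =>
              rw [hmq] at hi
              simp only [List.length_cons] at hi
              have hj : j < rtq.length := by omega
              rw [hmq, List.cons_append, List.drop_succ_cons]
              have hdj : List.drop j (rtq ++ v) = (rtq ++ v)[j]'(by simp; omega) :: List.drop (j+1) (rtq ++ v) :=
                List.drop_eq_getElem_cons (by simp; omega)
              rw [hdj, hmp]
              simp only [List.isPrefixOf, Bool.and_eq_true]
              intro ⟨hx, _⟩
              have hx' : ('\\' : Char) = (rtq ++ v)[j]'(by simp; omega) := by simpa using hx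
              have hget : (rtq ++ v)[j]'(by simp; omega) = rtq[j]'hj := List.getElem_append_left _
              rw [hget] at hx'
              exact (hrtq _ (List.getElem_mem hj)).1 hx'.symm
          have hfind : T.find? (fun r => PySem.Chars.startswith (q.1 ++ pvRepl p.1 p.2 v) r.1) = some q := by
            apply pv_find?_first T q hqmem
            · simp [PySem.Chars.startswith, List.isPrefixOf_iff_prefix, List.prefix_append]
            · intro r hr hrm
              by_contra hne
              have hrpre : r.1 <+: (q.1 ++ pvRepl p.1 p.2 v) :=
                List.isPrefixOf_iff_prefix.mp (by simpa [PySem.Chars.startswith] using hrm)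
              have hcmp := List.prefix_or_prefix_of_prefix hrpre (List.prefix_append q.1 _)
              have hR := hpw.forall (fun a b hab => ⟨hab.2, hab.1⟩) hr hqmem hne
              cases hcmp with
              | inl h => exact hR.1 (List.isPrefixOf_iff_prefix.mpr h)
              | inr h => exact hR.2 (List.isPrefixOf_iff_prefix.mpr h)
          have hq1 : q.1 ++ pvRepl p.1 p.2 v = '\\' :: (rtq ++ pvRepl p.1 p.2 v) := by
            rw [hmq]; simp
          rw [hskip, hq1, pvScan_cons_some T '\\' (rtq ++ pvRepl p.1 p.2 v) q (by rw [← hq1]; exact hfind)]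
          have hdropq : List.drop (q.1.length - 1) (rtq ++ pvRepl p.1 p.2 v) = pvRepl p.1 p.2 v := by
            rw [hmq]; simp
          rw [hdropq]
          have hvlen : v.length ≤ n := by simp only [hv, List.length_drop]; omega
          rw [ih _ hvlen]
          rw [pvScan_cons_some (p :: T) c t q
            (by rw [List.find?_cons_of_neg (by simpa [PySem.Chars.startswith] using hP)]; exact hfend)]
          have : List.drop (q.1.length - 1) t = v := by rw [hmq, hv]; simp
          rw [this]
        | none =>
          rw [pvRepl, if_neg (by simp [hP])]
          have hnone : T.find? (fun r => PySem.Chars.startswith (c :: pvRepl p.1 p.2 t) r.1) = none := by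
            rw [List.find?_eq_none]
            intro r hr
            obtain ⟨rtr, gr, hmr, hrtr, _, _⟩ := pv_entry_shape (hsh r hr)
            simp only [PySem.Chars.startswith, Bool.not_eq_true]
            rw [Bool.eq_false_iff]
            intro hx
            rw [hmr] at hx
            simp only [List.isPrefixOf, Bool.and_eq_true] at hx
            obtain ⟨hx1, hx2⟩ := hx
            have hc : c = '\\' := by simpa using ((beq_iff_eq).mp (by simpa using hx1)).symm
            have hrt : rtr.isPrefixOf t = true :=
              pv_ascii_prefix_repl hp t rtr (fun x hxx => (hrtr x hxx).2) hx2
            have : PySem.Chars.startswith (c :: t) r.1 = true := by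
              rw [hmr, hc]
              simp [PySem.Chars.startswith, List.isPrefixOf, hrt]
            exact absurd this (by simpa using (List.find?_eq_none.mp hfend r hr))
          rw [pvScan_cons_none T c _ hnone]
          rw [ih t (by omega)]
          rw [pvScan_cons_none (p :: T) c t
            (by rw [List.find?_cons_of_neg (by simpa [PySem.Chars.startswith] using hP)]; exact hfend)]

lemma pv_foldl_eq_scan (T : List (List Char × List Char)) (hT : pvTableOK T) :
    ∀ s, T.foldl
      (fun s p => if PySem.Chars.isIn p.1 s then PySem.Chars.replace s p.1 p.2 else s) s
      = pvScan T s := by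
  induction T with
  | nil => intro s; rw [pv_scan_nil_table]; rfl
  | cons p T' ih =>
    intro s
    obtain ⟨hsh, hpw⟩ := hT
    have hp : pvEntryOK p = true := hsh p (by simp)
    obtain ⟨rtp, g, hmp, _, _, _⟩ := pv_entry_shape hp
    have hpne : p.1 ≠ [] := by rw [hmp]; simp
    have hT' : pvTableOK T' := ⟨fun r hr => hsh r (by simp [hr]), hpw.of_cons⟩
    have hstep : (if PySem.Chars.isIn p.1 s then PySem.Chars.replace s p.1 p.2 else s)
        = pvRepl p.1 p.2 s := by
      by_cases hin : PySem.Chars.isIn p.1 s = true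
      · rw [if_pos hin, pv_replace_eq_pvRepl _ _ hpne]
      · rw [if_neg hin, pvRepl_of_not_infix p.1 p.2 s
          (by rw [← PySem.Chars.isIn_iff_infix]; simpa using hin)]
    rw [List.foldl_cons, hstep, ih hT', pv_scan_repl p T' hp hT' s.length s le_rfl]

lemma pv_table_ok : pvTableOK pvLatexSymbols := by
  constructor
  · decide
  · decide

-- ===== bridge lemmas: pvScan on A's table = B's backslash-triggered scan =====

lemma pv_table_map : pvLatexSymbols
    = pvGreek.map (fun q => ('\\' :: q.1.toList, [q.2])) := by decide

lemma pv_scan_eq_scanB : ∀ n (s : List Char), s.length ≤ n →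
    pvScan pvLatexSymbols s = pvScanB s := by
  intro n
  induction n with
  | zero =>
    intro s hs
    have : s = [] := by cases s <;> simp_all
    subst this
    rw [pvScan, pvScanB]
  | succ n ih =>
    intro s hs
    cases s with
    | nil => rw [pvScan, pvScanB]
    | cons c rest =>
      simp only [List.length_cons] at hs
      by_cases hc : c = '\\'
      · subst hc
        have hmap : pvLatexSymbols.find? (fun p => PySem.Chars.startswith ('\\' :: rest) p.1)
            = (pvGreek.find? (fun q => q.1.toList.isPrefixOf rest)).map
                (fun q => ('\\' :: q.1.toList, [q.2])) := by
          have hfun : ((fun p : List Char × List Char =>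
                PySem.Chars.startswith ('\\' :: rest) p.1) ∘
                (fun q : String × Char => ('\\' :: q.1.toList, ([q.2] : List Char))))
              = fun q : String × Char => q.1.toList.isPrefixOf rest := by
            funext q
            simp [Function.comp, PySem.Chars.startswith, List.isPrefixOf]
          rw [pv_table_map, List.find?_map, hfun]
        cases hf : pvGreek.find? (fun q => q.1.toList.isPrefixOf rest) with
        | none =>
          rw [pvScan_cons_none _ _ _ (by rw [hmap, hf]; rfl)]
          rw [pvScanB, if_pos rfl, hf]
          rw [ih rest (by omega)]
        | some q =>
          rw [pvScan_cons_some _ _ _ _ (by rw [hmap, hf]; rfl)]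
          rw [pvScanB, if_pos rfl, hf]
          simp only [List.length_cons, Nat.add_sub_cancel, List.cons_append, List.nil_append]
          rw [ih _ (by simp only [List.length_drop]; omega)]
      · rw [pvScan_cons_none _ _ _ (pv_find?_none_head _ pv_table_ok.1 c hc rest)]
        rw [pvScanB, if_neg hc]
        rw [ih rest (by omega)]
lemma pv_slash_eq (ch : Char) : ∀ n (s : List Char), s.length ≤ n →
    pvRepl ['\\', ch] [' '] s = pvSlash ch s := by
  intro n
  induction n with
  | zero =>
    intro s hs
    have : s = [] := by cases s <;> simp_all
    subst this
    rw [pvRepl, pvSlash]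
  | succ n ih =>
    intro s hs
    match s with
    | [] => rw [pvRepl, pvSlash]
    | [c] =>
      rw [pvRepl, pvSlash]
      have hpre : (['\\', ch].isPrefixOf [c]) = false := by simp [List.isPrefixOf]
      rw [hpre]
      simp [pvRepl]
    | c :: d :: t =>
      simp only [List.length_cons] at hs
      rw [pvRepl, pvSlash]
      by_cases h12 : c = '\\' ∧ d = ch
      · obtain ⟨h1, h2⟩ := h12
        have hpre : (['\\', ch].isPrefixOf (c :: d :: t)) = true := by
          simp [List.isPrefixOf, h1, h2]
        rw [if_pos (by simp [hpre]), if_pos ⟨h1, h2⟩]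
        simp only [List.length_cons, List.length_singleton, Nat.add_sub_cancel,
          List.drop_succ_cons, List.drop_zero, List.singleton_append]
        exact congrArg (' ' :: ·) (ih t (by omega))
      · have hpre : (['\\', ch].isPrefixOf (c :: d :: t)) = false := by
          rw [Bool.eq_false_iff]
          intro hx
          simp [List.isPrefixOf] at hx
          exact h12 ⟨hx.1.symm, hx.2.symm⟩
        rw [if_neg (by simp [hpre]), if_neg h12]
        exact congrArg (c :: ·) (ih (d :: t) (by simp; omega))
lemma pv_wrap_eq (s : List Char) :
    (PySem.Chars.startswith s ['$'] && PySem.Chars.endswith s ['$'] && decide (2 ≤ s.length))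
      = (decide (2 ≤ s.length) && (PySem.List.pyGet? s 0 == some '$')
          && (PySem.List.pyGet? s (-1) == some '$')) := by
  rw [Bool.eq_iff_iff]
  simp only [Bool.and_eq_true, PySem.Chars.startswith_iff, PySem.Chars.endswith_iff,
    decide_eq_true_eq, beq_iff_eq, PySem.List.pyGet?_zero, PySem.List.pyGet?_neg_one]
  constructor
  · rintro ⟨⟨⟨t, ht⟩, hsuf⟩, hl⟩
    subst ht
    refine ⟨⟨hl, by simp⟩, ?_⟩
    obtain ⟨u, hu⟩ := hsuf
    rw [← hu]
    simp
  · rintro ⟨⟨hl, h0⟩, hlast⟩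
    refine ⟨⟨?_, ?_⟩, hl⟩
    · cases s with
      | nil => simp at h0
      | cons c t =>
        simp at h0
        exact h0 ▸ ⟨t, rfl⟩
    · obtain ⟨l', hl'⟩ := List.getLast?_eq_some_iff.mp hlast
      exact ⟨l', hl'.symm⟩
lemma pv_del_eq (X : List Char) :
    PySem.Chars.replace (PySem.Chars.replace (PySem.Chars.replace X ['{'] []) ['}'] []) ['$'] []
      = X.filter (fun c => decide (c ∉ (['{', '}', '$'] : List Char))) := by
  rw [pv_replace_eq_pvRepl _ _ (by simp), pv_replace_eq_pvRepl _ _ (by simp),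
    pv_replace_eq_pvRepl _ _ (by simp)]
  rw [pvRepl_single_del, pvRepl_single_del, pvRepl_single_del]
  rw [List.filter_filter, List.filter_filter]
  apply List.filter_congr
  intro x _
  by_cases h1 : x = '{' <;> by_cases h2 : x = '}' <;> by_cases h3 : x = '$' <;>
    simp [h1, h2, h3]

-- the conversion chain shared by both branches of the final proof
lemma pv_convert (cs : List Char) :
    PySem.Chars.strip
      (PySem.Chars.replace
        (PySem.Chars.replace
          (PySem.Chars.replace
            (PySem.Chars.replace
              (PySem.Chars.replace
                (pvLatexSymbols.foldl
                  (fun s p => if PySem.Chars.isIn p.1 s then PySem.Chars.replace s p.1 p.2 else s)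
                  cs) ['{'] []) ['}'] []) ['$'] []) ['\\', ','] [' ']) ['\\', ' '] [' '])
    = PySem.Chars.strip
        (pvSlash ' '
          (pvSlash ','
            ((pvScanB cs).filter (fun c => decide (c ∉ (['{', '}', '$'] : List Char)))))) := by
  rw [pv_foldl_eq_scan _ pv_table_ok, pv_scan_eq_scanB cs.length cs le_rfl, pv_del_eq]
  rw [pv_replace_eq_pvRepl ['\\', ','] [' '] (by simp), pv_slash_eq ',' _ _ le_rfl,
    pv_replace_eq_pvRepl ['\\', ' '] [' '] (by simp), pv_slash_eq ' ' _ _ le_rfl]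

-- ===== VERDICT (by name: the statement is the Claim_ definition above) =====
theorem latex_to_svg_label_py_spec : Claim_equal_latex_to_svg_label_py := by
  intro text _
  unfold Spec_latex_to_svg_label_py latex_to_svg_label_py latex_to_svg_label_py_alt
  simp only [← pv_wrap_eq]
  by_cases hw : (PySem.Chars.startswith (PySem.Chars.strip text.toList) ['$']
      && PySem.Chars.endswith (PySem.Chars.strip text.toList) ['$']
      && decide (2 ≤ (PySem.Chars.strip text.toList).length)) = true
  · simp only [hw, if_true, Bool.true_and, Bool.or_true, Bool.true_or, Bool.or_false]
    refine Prod.ext ?_ ?_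
    · exact congrArg String.ofList (pv_convert _)
    · simp
  · simp only [Bool.not_eq_true] at hw
    simp only [hw, if_false, Bool.false_and, Bool.false_or]
    refine Prod.ext ?_ ?_
    · exact congrArg String.ofList (pv_convert _)
    · cases h1 : PySem.Chars.isIn ['$'] (PySem.Chars.strip text.toList) <;>
        cases h2 : PySem.Chars.isIn ['\\'] (PySem.Chars.strip text.toList) <;> simp
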